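-- pv_equiv track=rewrite | github.com/Alvin-Furman-CS-Classroom/project-2-ai-system-super-awesome-team-name | src/module4/meal_suggestion_planner.py | meal_has_duplicate_replacement_across_distinct_foods
-- ===== SOURCE A (Python) =====
-- from typing import Dict, FrozenSet, List, Literal, Optional, Sequence, Tuple, TypedDict
--
-- def meal_has_duplicate_replacement_across_distinct_foods(
--     start_meal: Tuple[Tuple[str, str], ...],
--     new_meal: Tuple[Tuple[str, str], ...],
--     orig_count: int,
-- ) -> bool:
--     """
--     True if two *different* original foods were swapped to the *same* replacement.
--
--     Same replacement for two identical original names (e.g. two rice lines) is allowed.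
--     """
--     by_new: Dict[str, set[str]] = {}
--     for i in range(min(orig_count, len(start_meal), len(new_meal))):
--         old_f, _ = start_meal[i]
--         new_f, _ = new_meal[i]
--         if new_f == old_f:
--             continue
--         by_new.setdefault(new_f, set()).add(old_f)
--     for olds in by_new.values():
--         if len(olds) >= 2:
--             return True
--     return False
-- ===== SOURCE B (Python) =====
-- def meal_has_duplicate_replacement_across_distinct_foods(start_meal, new_meal, orig_count):
--     first_old = {}
--     limit = max(orig_count, 0)
--     for (old_f, _), (new_f, _) in zip(start_meal[:limit], new_meal):
--         if new_f == old_f: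
--             continue
--         if first_old.setdefault(new_f, old_f) != old_f:
--             return True
--     return False
-- ===== Notes on version B (the rewrite author's own statement) =====
-- stated objective: simpler
-- what changed: A builds a dict mapping each replacement to the set of originals over a separate index-range loop and then scans all dict values for a set of size >= 2; B makes one pass over the zipped (truncated) meals keeping only the first original seen per replacement and returns True immediately at the first conflict, with no second scan.
import Mathlib
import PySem

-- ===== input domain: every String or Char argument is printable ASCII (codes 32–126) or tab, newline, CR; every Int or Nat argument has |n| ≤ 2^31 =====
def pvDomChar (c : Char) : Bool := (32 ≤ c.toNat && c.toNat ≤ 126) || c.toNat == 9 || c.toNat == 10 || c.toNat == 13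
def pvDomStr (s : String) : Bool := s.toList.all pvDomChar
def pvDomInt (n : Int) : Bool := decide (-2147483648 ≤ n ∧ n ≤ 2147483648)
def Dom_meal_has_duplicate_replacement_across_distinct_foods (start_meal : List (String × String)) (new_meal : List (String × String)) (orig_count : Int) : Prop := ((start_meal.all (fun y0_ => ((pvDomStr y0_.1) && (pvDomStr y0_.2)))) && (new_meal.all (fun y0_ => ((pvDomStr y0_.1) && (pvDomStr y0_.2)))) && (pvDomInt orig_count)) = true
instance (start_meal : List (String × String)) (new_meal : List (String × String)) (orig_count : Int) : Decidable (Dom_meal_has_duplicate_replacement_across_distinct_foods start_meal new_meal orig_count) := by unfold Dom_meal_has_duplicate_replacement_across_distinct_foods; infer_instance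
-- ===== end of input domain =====

-- B replaces A's two phases (build a dict of sets over all indices, then scan the values for a
-- set of size ≥ 2) by one zip pass that keeps only the first original seen per replacement and
-- returns True at the first conflict.  Objective: simpler (single pass, early exit).

-- ===== PORT A =====
-- one iteration of A's range loop: index both lists, skip when unchanged, else
-- by_new.setdefault(new_f, set()).add(old_f)
def mealAStep (start_meal new_meal : List (String × String))
    (d : PySem.Dict String (PySem.Set String)) (i : Int) : PySem.Dict String (PySem.Set String) :=
  match PySem.List.pyGet? start_meal i, PySem.List.pyGet? new_meal i with
  | some s, some t =>
      if t.1 == s.1 then d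
      else d.modify t.1 PySem.Set.empty (fun olds => PySem.Set.add olds s.1)
  | _, _ => d   -- unreachable: the range is bounded by both lengths

def meal_has_duplicate_replacement_across_distinct_foods (start_meal : List (String × String)) (new_meal : List (String × String)) (orig_count : Int) : Bool :=
  let by_new := (PySem.List.pyRange 0 (min (min orig_count (start_meal.length : Int)) (new_meal.length : Int))).foldl
      (mealAStep start_meal new_meal) PySem.Dict.empty
  by_new.values.any (fun olds => decide ((2 : Int) ≤ PySem.Set.len olds))

-- ===== PORT B =====
-- B's loop body: 'if first_old.setdefault(new_f, old_f) != old_f: return True'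
def mealAltLoop (pairs : List ((String × String) × (String × String)))
    (first_old : PySem.Dict String String) : Bool :=
  match pairs with
  | [] => false
  | (s, t) :: rest =>
      if t.1 == s.1 then mealAltLoop rest first_old
      else
        let v := (first_old.get? t.1).getD s.1          -- the value setdefault returns
        if v != s.1 then true
        else mealAltLoop rest (first_old.setdefault t.1 s.1)

def meal_has_duplicate_replacement_across_distinct_foods_alt (start_meal : List (String × String)) (new_meal : List (String × String)) (orig_count : Int) : Bool :=
  mealAltLoop ((PySem.List.slice start_meal none (some (max orig_count 0))).zip new_meal) PySem.Dict.empty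

-- ===== PRECONDITION & SPEC =====
def Spec_meal_has_duplicate_replacement_across_distinct_foods (start_meal : List (String × String)) (new_meal : List (String × String)) (orig_count : Int) (out : Bool) : Prop := out = meal_has_duplicate_replacement_across_distinct_foods_alt start_meal new_meal orig_count
instance (start_meal : List (String × String)) (new_meal : List (String × String)) (orig_count : Int) (out : Bool) : Decidable (Spec_meal_has_duplicate_replacement_across_distinct_foods start_meal new_meal orig_count out) := by unfold Spec_meal_has_duplicate_replacement_across_distinct_foods; infer_instance

-- ===== CLAIM (what is proved, stated in full; the proofs are below) =====
def Claim_equal_meal_has_duplicate_replacement_across_distinct_foods : Prop := ∀ (start_meal : List (String × String)) (new_meal : List (String × String)) (orig_count : Int), Dom_meal_has_duplicate_replacement_across_distinct_foods start_meal new_meal orig_count → Spec_meal_has_duplicate_replacement_across_distinct_foods start_meal new_meal orig_count (meal_has_duplicate_replacement_across_distinct_foods start_meal new_meal orig_count)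

-- ===== LEMMAS AND PROOFS =====

-- A's loop body as a function of the (start, new) pair at the index
def stepP (d : PySem.Dict String (PySem.Set String))
    (p : (String × String) × (String × String)) : PySem.Dict String (PySem.Set String) :=
  if p.2.1 == p.1.1 then d
  else d.modify p.2.1 PySem.Set.empty (fun olds => PySem.Set.add olds p.1.1)

-- A's second loop (scan of the dict values)
def checkA (d : PySem.Dict String (PySem.Set String)) : Bool :=
  d.values.any (fun olds => decide ((2 : Int) ≤ PySem.Set.len olds))

lemma two_mem_length {s : List String} {o₁ o₂ : String} (h1 : o₁ ∈ s) (h2 : o₂ ∈ s)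
    (hne : o₁ ≠ o₂) : 2 ≤ s.length := by
  cases s with
  | nil => simp at h1
  | cons a t =>
    cases t with
    | nil => simp at h1 h2; exact absurd (h1.trans h2.symm) hne
    | cons b u => simp

-- a Nodup list whose members are exactly {o} is [o]
lemma nodup_members_single {s : List String} {o : String} (hnd : s.Nodup)
    (h : ∀ v, v ∈ s ↔ v = o) : s = [o] := by
  cases s with
  | nil => exact absurd ((h o).mpr rfl) (by simp)
  | cons a t =>
    cases t with
    | nil => simp [(h a).mp (by simp)]
    | cons b u =>
      have ha := (h a).mp (by simp)
      have hb := (h b).mp (by simp)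
      simp [ha, hb] at hnd

-- zipping a truncated left list truncates the zip
lemma zip_take_left (xs ys : List (String × String)) (m : Nat) :
    (xs.take m).zip ys = (xs.zip ys).take m := by
  induction xs generalizing ys m with
  | nil => simp
  | cons x xs ih =>
    cases ys with
    | nil => simp
    | cons y ys =>
      cases m with
      | zero => simp
      | succ m => simp [ih]

-- the index-fold of A is the pair-fold over the zipped, truncated lists
lemma bridgeA (xs ys : List (String × String)) (a k : Nat)
    (h : a + k ≤ (xs.zip ys).length) (d : PySem.Dict String (PySem.Set String)) :
    (PySem.List.pyRange (a : Int) ((a + k : Nat) : Int)).foldl (mealAStep xs ys) d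
      = (((xs.zip ys).drop a).take k).foldl stepP d := by
  induction k generalizing a d with
  | zero =>
    rw [PySem.List.pyRange_one_eq_nil (by simp)]
    simp
  | succ k ih =>
    have hlt : a < (xs.zip ys).length := by omega
    have hx : a < xs.length := by rw [List.length_zip] at hlt; omega
    have hy : a < ys.length := by rw [List.length_zip] at hlt; omega
    rw [PySem.List.pyRange_one_cons (by push_cast; omega)]
    rw [List.drop_eq_getElem_cons hlt]
    simp only [List.foldl_cons, List.take_succ_cons]
    have hstep : mealAStep xs ys d (a : Int) = stepP d ((xs.zip ys)[a]) := by
      simp [mealAStep, stepP, PySem.List.pyGet?_natCast, List.getElem?_eq_getElem hx,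
        List.getElem?_eq_getElem hy, List.getElem_zip]
    rw [hstep]
    have e1 : ((a : Int) + 1) = ((a + 1 : Nat) : Int) := by push_cast; ring
    have e2 : ((a + (k + 1) : Nat) : Int) = (((a + 1) + k : Nat) : Int) := by push_cast; ring
    rw [e1, e2, ih (a + 1) (by omega)]

-- keys Nodup is preserved by stepP
lemma nodup_keys_stepP (d : PySem.Dict String (PySem.Set String)) (p) (hK : d.keys.Nodup) :
    (stepP d p).keys.Nodup := by
  unfold stepP
  split
  · exact hK
  · have : (d.modify p.2.1 PySem.Set.empty (fun olds => PySem.Set.add olds p.1.1)).keys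
        = (d.insert p.2.1 ((fun olds => PySem.Set.add olds p.1.1) (d.getD p.2.1 PySem.Set.empty))).keys :=
      PySem.Dict.keys_modify ..
    rw [this]
    exact PySem.Dict.nodup_keys_insert _ _ _ hK

-- membership in a value set is preserved by stepP
lemma mem_stepP (d : PySem.Dict String (PySem.Set String)) (p) (k v : String)
    (h : v ∈ d.getD k PySem.Set.empty) : v ∈ (stepP d p).getD k PySem.Set.empty := by
  unfold stepP
  split
  · exact h
  · rw [PySem.Dict.getD_modify]
    split
    · next heq => subst heq; exact (PySem.Set.mem_add _ _ _).mpr (Or.inl h)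
    · exact h

-- once some key holds two distinct originals, the final check is true
lemma conflictA (L : List ((String × String) × (String × String)))
    (d : PySem.Dict String (PySem.Set String)) (hK : d.keys.Nodup)
    (k o₁ o₂ : String) (h1 : o₁ ∈ d.getD k PySem.Set.empty) (h2 : o₂ ∈ d.getD k PySem.Set.empty)
    (hne : o₁ ≠ o₂) : checkA (L.foldl stepP d) = true := by
  induction L generalizing d with
  | nil =>
    simp only [List.foldl_nil]
    have hc : d.contains k = true := by
      by_cases hc : d.contains k = true
      · exact hc
      · rw [PySem.Dict.getD_of_not_contains _ _ (by simpa using hc)] at h1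
        simp [PySem.Set.empty] at h1
    have hkmem : k ∈ d.keys := (PySem.Dict.contains_iff_mem_keys _ _).mp hc
    unfold checkA
    rw [PySem.Dict.values_eq_map_keys d hK PySem.Set.empty, List.any_map]
    refine List.any_eq_true.mpr ⟨k, hkmem, ?_⟩
    simp only [Function.comp]
    have := two_mem_length h1 h2 hne
    simp only [PySem.Set.len, decide_eq_true_eq]
    exact_mod_cast this
  | cons p rest ih =>
    simp only [List.foldl_cons]
    exact ih (stepP d p) (nodup_keys_stepP d p hK) (mem_stepP d p k o₁ h1) (mem_stepP d p k o₂ h2)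

-- main invariant: each set in A's dict is exactly the singleton of B's stored representative
lemma mainLemma (L : List ((String × String) × (String × String)))
    (d : PySem.Dict String (PySem.Set String)) (m : PySem.Dict String String)
    (hK : d.keys.Nodup) (hS : ∀ k, (d.getD k PySem.Set.empty).Nodup)
    (hInv : ∀ k v, v ∈ d.getD k PySem.Set.empty ↔ m.get? k = some v) :
    checkA (L.foldl stepP d) = mealAltLoop L m := by
  induction L generalizing d m with
  | nil =>
    simp only [List.foldl_nil, mealAltLoop]
    unfold checkA
    rw [PySem.Dict.values_eq_map_keys d hK PySem.Set.empty, List.any_map]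
    apply List.any_eq_false.mpr
    intro k _
    cases hmg : m.get? k with
    | none =>
      have hnil : d.getD k PySem.Set.empty = [] :=
        List.eq_nil_iff_forall_not_mem.mpr (fun v hv => by
          have := (hInv k v).mp hv; rw [hmg] at this; simp at this)
      have hnil' : d.getD k ([] : PySem.Set String) = [] := hnil
      simp [Function.comp, hnil', PySem.Set.len]
    | some o =>
      have hone : d.getD k PySem.Set.empty = [o] :=
        nodup_members_single (hS k) (fun v => by rw [hInv k v, hmg]; simp [eq_comm])
      have hone' : d.getD k ([] : PySem.Set String) = [o] := hone
      simp [Function.comp, hone', PySem.Set.len]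
  | cons p rest ih =>
    obtain ⟨⟨old, o2⟩, nw, n2⟩ := p
    simp only [List.foldl_cons, mealAltLoop]
    by_cases heq : nw = old
    · subst heq
      simp only [stepP, BEq.rfl, if_true]
      exact ih d m hK hS hInv
    · have hbeq : (nw == old) = false := by simp [heq]
      have hstep : stepP d ((old, o2), nw, n2)
          = d.modify nw PySem.Set.empty (fun olds => PySem.Set.add olds old) := by
        simp [stepP, hbeq]
      rw [hstep, hbeq]
      simp only [Bool.false_eq_true, if_false]
      cases hmg : m.get? nw with
      | some o =>
        by_cases ho : o = old
        · subst ho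
          -- setdefault returns the stored value o = old: B continues with m unchanged
          have hcont : m.contains nw = true := by
            rw [PySem.Dict.contains_eq_isSome_get?, hmg]; rfl
          rw [PySem.Dict.setdefault_of_contains _ _ hcont]
          simp only [Option.getD_some, bne_self_eq_false, Bool.false_eq_true, if_false]
          apply ih _ m
          · have := PySem.Dict.keys_modify d nw PySem.Set.empty (fun olds => PySem.Set.add olds o)
            rw [this]; exact PySem.Dict.nodup_keys_insert _ _ _ hK
          · intro k
            rw [PySem.Dict.getD_modify]
            split
            · exact PySem.Set.nodup_add _ _ (hS _)
            · exact hS k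
          · intro k v
            rw [PySem.Dict.getD_modify]
            split
            · next hk =>
              subst hk
              rw [PySem.Set.mem_add, hInv k v, hmg]
              constructor
              · rintro (h | h)
                · exact h
                · simp [h]
              · intro h; exact Or.inl h
            · exact hInv k v
        · -- conflict: B returns True; A's dict now holds two distinct originals at nw
          simp only [Option.getD_some]
          have hb : (o != old) = true := by simp [ho]
          simp only [hb, if_true]
          have h1 : old ∈ (d.modify nw PySem.Set.empty (fun olds => PySem.Set.add olds old)).getD nw PySem.Set.empty := by
            rw [PySem.Dict.getD_modify_self]
            exact (PySem.Set.mem_add _ _ _).mpr (Or.inr rfl)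
          have h2 : o ∈ (d.modify nw PySem.Set.empty (fun olds => PySem.Set.add olds old)).getD nw PySem.Set.empty := by
            rw [PySem.Dict.getD_modify_self]
            exact (PySem.Set.mem_add _ _ _).mpr (Or.inl ((hInv nw o).mpr hmg))
          apply conflictA rest _ _ nw o old h2 h1 ho
          have := PySem.Dict.keys_modify d nw PySem.Set.empty (fun olds => PySem.Set.add olds old)
          rw [this]; exact PySem.Dict.nodup_keys_insert _ _ _ hK
      | none =>
        have hcont : m.contains nw = false := by
          rw [PySem.Dict.contains_eq_isSome_get?, hmg]; rfl
        rw [PySem.Dict.setdefault_of_not_contains _ _ hcont]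
        simp only [Option.getD_none, bne_self_eq_false, Bool.false_eq_true, if_false]
        have hnil : d.getD nw PySem.Set.empty = [] :=
          List.eq_nil_iff_forall_not_mem.mpr (fun v hv => by
            have := (hInv nw v).mp hv; rw [hmg] at this; simp at this)
        apply ih _ (m.insert nw old)
        · have := PySem.Dict.keys_modify d nw PySem.Set.empty (fun olds => PySem.Set.add olds old)
          rw [this]; exact PySem.Dict.nodup_keys_insert _ _ _ hK
        · intro k
          rw [PySem.Dict.getD_modify]
          split
          · exact PySem.Set.nodup_add _ _ (hS _)
          · exact hS k
        · intro k v
          rw [PySem.Dict.getD_modify, PySem.Dict.get?_insert]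
          split
          · next hk =>
            subst hk
            rw [hnil]
            simp [PySem.Set.add, eq_comm]
          · exact hInv k v

-- ===== VERDICT (by name: the statement is the Claim_ definition above) =====
theorem meal_has_duplicate_replacement_across_distinct_foods_spec : Claim_equal_meal_has_duplicate_replacement_across_distinct_foods := by
  intro xs ys c _
  unfold Spec_meal_has_duplicate_replacement_across_distinct_foods
  unfold meal_has_duplicate_replacement_across_distinct_foods
  unfold meal_has_duplicate_replacement_across_distinct_foods_alt
  set n : Int := min (min c (xs.length : Int)) (ys.length : Int) with hn
  have hnx : n ≤ (xs.length : Int) := by omega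
  have hny : n ≤ (ys.length : Int) := by omega
  have hzlen : n.toNat ≤ (xs.zip ys).length := by
    rw [List.length_zip]; omega
  -- B's list is (xs.zip ys).take n.toNat
  have hB : (PySem.List.slice xs none (some (max c 0))).zip ys = ((xs.zip ys).take n.toNat) := by
    rw [Eq.symm (Int.ofNat_toNat c), PySem.List.slice_to_natCast, zip_take_left]
    have hmin : min c.toNat ((xs.zip ys).length) = min n.toNat ((xs.zip ys).length) := by
      rw [List.length_zip]; omega
    rw [List.take_eq_take_min, hmin, ← List.take_eq_take_min]
  -- A's fold list is the same pair fold
  have hA : (PySem.List.pyRange 0 n).foldl (mealAStep xs ys) PySem.Dict.empty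
      = (((xs.zip ys).take n.toNat)).foldl stepP PySem.Dict.empty := by
    have h0 : (PySem.List.pyRange 0 n) = PySem.List.pyRange ((0 : Nat) : Int) (((0 + n.toNat : Nat)) : Int) := by
      by_cases hpos : 0 ≤ n
      · congr 1; simp [Int.toNat_of_nonneg hpos]
      · rw [PySem.List.pyRange_one_eq_nil (by omega), PySem.List.pyRange_one_eq_nil (by simp; omega)]
    rw [h0, bridgeA xs ys 0 n.toNat (by omega) PySem.Dict.empty]
    simp
  show ((PySem.List.pyRange 0 n).foldl (mealAStep xs ys) PySem.Dict.empty).values.any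
      (fun olds => decide ((2 : Int) ≤ PySem.Set.len olds)) = _
  rw [hB]
  have := mainLemma ((xs.zip ys).take n.toNat) PySem.Dict.empty PySem.Dict.empty
    (by rw [PySem.Dict.keys_empty]; exact List.nodup_nil)
    (fun k => by rw [PySem.Dict.getD_empty]; exact List.nodup_nil)
    (fun k v => by rw [PySem.Dict.getD_empty, PySem.Dict.get?_empty]; simp [PySem.Set.empty])
  rw [← this, ← hA]
  rfl
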